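-- pv_equiv track=rewrite | github.com/vlckel/PROG1 | I-PROG1/cv.8/ukol1.py | vytvorPole
-- ===== SOURCE A (Python) =====
-- def vytvorPole(N,M):
--     hodnota = 515
--     pole = []
--     for i in range(0,N):
--         radek = []
--         for j in range(0,M):
--             radek.append(hodnota)
--             hodnota = hodnota + 6
--         pole.append(radek)
--
--     return(pole)
-- ===== SOURCE B (Python) =====
-- def vytvorPole(N, M):
--     return [[515 + 6 * (i * M + j) for j in range(M)] for i in range(N)]
-- ===== Notes on version B (the rewrite author's own statement) =====
-- stated objective: simpler
-- what changed: Replaces the running accumulator incremented once per cell with a stateless closed form 515 + 6*(i*M + j) computed per cell in a nested comprehension.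
import Mathlib
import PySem

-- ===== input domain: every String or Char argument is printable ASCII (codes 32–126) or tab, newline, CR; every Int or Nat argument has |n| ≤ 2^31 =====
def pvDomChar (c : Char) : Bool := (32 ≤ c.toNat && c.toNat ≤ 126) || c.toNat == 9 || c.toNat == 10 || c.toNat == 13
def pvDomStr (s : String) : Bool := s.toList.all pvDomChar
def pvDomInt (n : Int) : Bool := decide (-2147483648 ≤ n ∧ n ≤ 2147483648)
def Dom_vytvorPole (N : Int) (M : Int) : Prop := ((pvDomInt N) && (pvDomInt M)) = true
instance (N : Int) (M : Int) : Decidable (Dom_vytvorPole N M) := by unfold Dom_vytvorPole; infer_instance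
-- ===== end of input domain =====

-- B replaces A's running accumulator (incremented once per cell) with the stateless
-- closed form 515 + 6*(i*M + j) in a nested comprehension (objective: simpler).

-- ===== PORT A =====
-- running state (hodnota, pole); inner loop carries (hodnota, radek)
def vytvorPole (N : Int) (M : Int) : List (List Int) :=
  (PySem.List.pyRange 0 N 1).foldl
    (fun (st : Int × List (List Int)) _i =>
      let inner :=
        (PySem.List.pyRange 0 M 1).foldl
          (fun (s : Int × List Int) _j => (s.1 + 6, s.2 ++ [s.1])) (st.1, [])
      (inner.1, st.2 ++ [inner.2]))
    (515, []) |>.2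

-- ===== PORT B =====
def vytvorPole_alt (N : Int) (M : Int) : List (List Int) :=
  (PySem.List.pyRange 0 N 1).map (fun i =>
    (PySem.List.pyRange 0 M 1).map (fun j => 515 + 6 * (i * M + j)))

-- ===== PRECONDITION & SPEC =====
def Spec_vytvorPole (N : Int) (M : Int) (out : List (List Int)) : Prop := out = vytvorPole_alt N M
instance (N : Int) (M : Int) (out : List (List Int)) : Decidable (Spec_vytvorPole N M out) := by unfold Spec_vytvorPole; infer_instance

-- ===== CLAIM (what is proved, stated in full; the proofs are below) =====
def Claim_equal_vytvorPole : Prop := ∀ (N : Int) (M : Int), Dom_vytvorPole N M → Spec_vytvorPole N M (vytvorPole N M)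

-- ===== LEMMAS AND PROOFS =====

-- the inner loop: only the list's length matters
lemma pv_inner_fold (l : List Int) (h : Int) (acc : List Int) :
    l.foldl (fun (s : Int × List Int) _ => (s.1 + 6, s.2 ++ [s.1])) (h, acc)
      = (h + 6 * l.length, acc ++ (List.range l.length).map (fun j : Nat => h + 6 * (j : Int))) := by
  induction l generalizing h acc with
  | nil => simp
  | cons x xs ih =>
      simp only [List.foldl_cons, ih, List.length_cons, List.range_succ_eq_map]
      refine Prod.ext ?_ ?_
      · push_cast; ring
      · simp only [List.map_cons, List.map_map, Nat.cast_zero, mul_zero, add_zero,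
          List.append_assoc, List.singleton_append]
        congr 1
        congr 1
        refine List.map_congr_left ?_
        intro a _; simp [Function.comp]; ring

-- the outer loop with the inner loop's result substituted in
lemma pv_outer_fold (l : List Int) (m : Nat) (h : Int) (pole : List (List Int)) :
    l.foldl (fun (st : Int × List (List Int)) _ =>
        (st.1 + 6 * m, st.2 ++ [(List.range m).map (fun j : Nat => st.1 + 6 * (j : Int))])) (h, pole)
      = (h + 6 * m * l.length,
         pole ++ (List.range l.length).map (fun i : Nat =>
           (List.range m).map (fun j : Nat => h + 6 * ((i : Int) * m + j)))) := by
  induction l generalizing h pole with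
  | nil => simp
  | cons x xs ih =>
      simp only [List.foldl_cons, ih, List.length_cons, List.range_succ_eq_map]
      refine Prod.ext ?_ ?_
      · push_cast; ring
      · simp only [List.map_cons, List.map_map, Nat.cast_zero, zero_mul, zero_add,
          List.append_assoc, List.singleton_append]
        congr 1
        congr 1
        refine List.map_congr_left ?_
        intro i _
        simp only [Function.comp]
        refine List.map_congr_left ?_
        intro j _; push_cast; ring

theorem vytvorPole_eq (N M : Int) : vytvorPole N M = vytvorPole_alt N M := by
  unfold vytvorPole vytvorPole_alt
  have hstep : (fun (st : Int × List (List Int)) (_i : Int) =>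
      let inner :=
        (PySem.List.pyRange 0 M 1).foldl
          (fun (s : Int × List Int) _j => (s.1 + 6, s.2 ++ [s.1])) (st.1, [])
      (inner.1, st.2 ++ [inner.2]))
      = (fun (st : Int × List (List Int)) _ =>
        (st.1 + 6 * (M.toNat : Nat), st.2 ++ [(List.range M.toNat).map (fun j : Nat => st.1 + 6 * (j : Int))])) := by
    funext st x
    simp only [pv_inner_fold, PySem.List.length_pyRange_one, List.nil_append, Int.sub_zero]
  rw [hstep, pv_outer_fold]
  simp only [List.nil_append]
  rw [PySem.List.pyRange_one 0 N, PySem.List.pyRange_one 0 M]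
  simp only [List.length_map, List.length_range, List.map_map, Int.sub_zero]
  refine List.map_congr_left ?_
  intro i _
  rcases le_or_gt M 0 with hM | hM
  · have h1 : M.toNat = 0 := Int.toNat_of_nonpos hM
    have h2 : (M - 0).toNat = 0 := by omega
    simp [h1]
  · have hMt : ((M.toNat : Int)) = M := Int.toNat_of_nonneg hM.le
    simp only [Function.comp]
    refine List.map_congr_left ?_
    intro j _
    simp [hMt]

-- ===== VERDICT (by name: the statement is the Claim_ definition above) =====
theorem vytvorPole_spec : Claim_equal_vytvorPole := by
  intro N M _
  exact vytvorPole_eq N M
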